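-- pv_equiv track=rewrite | github.com/dreamchef/numerical-analysis-methods | Labs/Lab 8/prelab8.py | pointsInIntervals
-- ===== SOURCE A (Python) =====
-- def pointsInIntervals (xeval, xint):
--
--     pointsInIntervals = []
--
--     for i in range(len(xint)-1):
--
--         pointsInSingleInterval = []
--
--
--         for point in xeval:
--
--
--             if xint[i] <= point and point <= xint[i+1]:
--
--                 pointsInSingleInterval.append(point)
--
--
--         pointsInIntervals.append(pointsInSingleInterval)
--
--
--     return pointsInIntervals
-- ===== SOURCE B (Python) =====
-- def _bisect_left(a, x):
--     lo, hi = 0, len(a)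
--     while lo < hi:
--         mid = (lo + hi) // 2
--         if a[mid] < x:
--             lo = mid + 1
--         else:
--             hi = mid
--     return lo
--
--
-- def _bisect_right(a, x):
--     lo, hi = 0, len(a)
--     while lo < hi:
--         mid = (lo + hi) // 2
--         if x < a[mid]:
--             hi = mid
--         else:
--             lo = mid + 1
--     return lo
--
--
-- def pointsInIntervals(xeval, xint):
--     # Sort (value, original position) once; each interval [xint[k], xint[k+1]]
--     # is answered by two binary searches on the sorted values, and the hits are
--     # put back into xeval order by sorting their original positions.
--     pairs = sorted(((v, i) for i, v in enumerate(xeval)), key=lambda p: p[0])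
--     vals = [p[0] for p in pairs]
--     pos = [p[1] for p in pairs]
--     result = []
--     for k in range(len(xint) - 1):
--         left = _bisect_left(vals, xint[k])
--         right = _bisect_right(vals, xint[k + 1])
--         result.append(list(map(xeval.__getitem__, sorted(pos[left:right]))))
--     return result
-- ===== Notes on version B (the rewrite author's own statement) =====
-- stated objective: alternative
-- what changed: B sorts (value, position) pairs once, answers each interval [xint[k], xint[k+1]] with two binary searches on the sorted values, and restores xeval order by sorting the slice's original positions, instead of A's full rescan of xeval per interval.
import Mathlib
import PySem

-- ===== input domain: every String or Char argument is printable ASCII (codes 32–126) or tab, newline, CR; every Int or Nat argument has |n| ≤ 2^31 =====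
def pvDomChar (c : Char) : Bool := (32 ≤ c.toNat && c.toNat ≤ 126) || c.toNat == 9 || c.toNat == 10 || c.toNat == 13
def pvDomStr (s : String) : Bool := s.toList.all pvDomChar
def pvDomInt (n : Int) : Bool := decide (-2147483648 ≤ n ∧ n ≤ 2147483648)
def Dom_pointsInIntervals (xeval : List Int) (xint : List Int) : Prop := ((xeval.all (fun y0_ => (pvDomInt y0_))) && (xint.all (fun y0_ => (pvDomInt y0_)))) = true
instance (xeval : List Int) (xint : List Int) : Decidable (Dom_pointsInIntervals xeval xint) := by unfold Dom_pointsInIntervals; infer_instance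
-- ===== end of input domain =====

-- B sorts (value, position) pairs once, answers each interval by two binary searches
-- on the sorted values and restores xeval order by sorting the hit positions,
-- instead of A's full rescan of xeval per interval; proved to return exactly A's value.

-- ===== PORT A =====
-- Literal port of A: for i in range(len(xint)-1): rescan xeval, collect points with xint[i] <= p <= xint[i+1].
def pointsInIntervals (xeval : List Int) (xint : List Int) : List (List Int) :=
  (PySem.List.pyRange 0 ((xint.length : Int) - 1) 1).foldl
    (fun res i =>
      let single := xeval.foldl
        (fun s point =>
          if PySem.List.pyGetD xint i 0 ≤ point ∧ point ≤ PySem.List.pyGetD xint (i + 1) 0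
          then s ++ [point] else s) []
      res ++ [single]) []

-- ===== PORT B =====
-- Hand port of Source B's _bisect_left while-loop (exact: a[mid] with 0 ≤ lo ≤ mid < hi ≤ len(a) is
-- getD; the structural fuel counter hi - lo bounds the iteration count, so it never runs out).
def pvBisectLeftGo (a : List Int) (x : Int) : Nat → Nat → Nat → Nat
  | 0, lo, _ => lo
  | fuel + 1, lo, hi =>
    if lo < hi then
      let mid := (lo + hi) / 2
      if a.getD mid 0 < x then pvBisectLeftGo a x fuel (mid + 1) hi
      else pvBisectLeftGo a x fuel lo mid
    else lo

def pvBisectLeft (a : List Int) (x : Int) (lo hi : Nat) : Nat :=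
  pvBisectLeftGo a x (hi - lo) lo hi

-- Hand port of Source B's _bisect_right while-loop (exact, same indexing and fuel argument).
def pvBisectRightGo (a : List Int) (x : Int) : Nat → Nat → Nat → Nat
  | 0, lo, _ => lo
  | fuel + 1, lo, hi =>
    if lo < hi then
      let mid := (lo + hi) / 2
      if x < a.getD mid 0 then pvBisectRightGo a x fuel lo mid
      else pvBisectRightGo a x fuel (mid + 1) hi
    else lo

def pvBisectRight (a : List Int) (x : Int) (lo hi : Nat) : Nat :=
  pvBisectRightGo a x (hi - lo) lo hi

-- Literal port of B: sort (value, position) pairs once, two binary searches per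
-- interval on the sorted values, then sort the slice's positions and read xeval back.
def pointsInIntervals_alt (xeval : List Int) (xint : List Int) : List (List Int) :=
  let pairs := PySem.List.sorted ((PySem.List.enumerate xeval).map (fun p => (p.2, p.1))) (fun p => p.1) false
  let vals := pairs.map (fun p => p.1)
  let pos := pairs.map (fun p => p.2)
  (PySem.List.pyRange 0 ((xint.length : Int) - 1) 1).foldl
    (fun result k =>
      let left := pvBisectLeft vals (PySem.List.pyGetD xint k 0) 0 vals.length
      let right := pvBisectRight vals (PySem.List.pyGetD xint (k + 1) 0) 0 vals.length
      result ++ [(PySem.List.sorted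
          (PySem.List.slice pos (some (left : Int)) (some (right : Int))) (fun i => i) false).map
        (fun i => PySem.List.pyGetD xeval i 0)]) []

-- ===== PRECONDITION & SPEC =====
def Spec_pointsInIntervals (xeval : List Int) (xint : List Int) (out : List (List Int)) : Prop := out = pointsInIntervals_alt xeval xint
instance (xeval : List Int) (xint : List Int) (out : List (List Int)) : Decidable (Spec_pointsInIntervals xeval xint out) := by unfold Spec_pointsInIntervals; infer_instance

-- ===== CLAIM (what is proved, stated in full; the proofs are below) =====
def Claim_equal_pointsInIntervals : Prop := ∀ (xeval : List Int) (xint : List Int), Dom_pointsInIntervals xeval xint → Spec_pointsInIntervals xeval xint (pointsInIntervals xeval xint)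

-- ===== LEMMAS AND PROOFS =====

-- a number r that splits a list into a q-true prefix and a q-false suffix is countP q
lemma pvCount_of_split (a : List Int) (q : Int → Bool) (r : Nat) (hr : r ≤ a.length)
    (h1 : ∀ j (h : j < a.length), j < r → q a[j])
    (h2 : ∀ j (h : j < a.length), r ≤ j → q a[j] = false) :
    a.countP q = r := by
  conv_lhs => rw [← List.take_append_drop r a]
  rw [List.countP_append]
  have ht : (a.take r).countP q = (a.take r).length := by
    apply List.countP_eq_length.mpr
    intro b hb
    obtain ⟨j, hj, hbe⟩ := List.mem_iff_getElem.mp hb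
    have hjl : j < r ∧ j < a.length := by simp [List.length_take] at hj; omega
    rw [← hbe, List.getElem_take]
    exact h1 j hjl.2 hjl.1
  have hd : (a.drop r).countP q = 0 := by
    apply List.countP_eq_zero.mpr
    intro b hb
    obtain ⟨j, hj, hbe⟩ := List.mem_iff_getElem.mp hb
    have hlen : j < a.length - r := by simpa using hj
    rw [← hbe, List.getElem_drop]
    simp [h2 (r + j) (by omega) (by omega)]
  rw [ht, hd, List.length_take]
  omega

-- invariant of Source B's _bisect_left loop on a sorted list
lemma pvBisectLeft_inv (a : List Int) (x : Int) (hs : a.Pairwise (· ≤ ·)) :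
    ∀ n lo hi, hi - lo ≤ n → lo ≤ hi → hi ≤ a.length →
    (∀ j (h : j < a.length), j < lo → a[j] < x) →
    (∀ j (h : j < a.length), hi ≤ j → x ≤ a[j]) →
    pvBisectLeftGo a x n lo hi ≤ a.length ∧
    (∀ j (h : j < a.length), j < pvBisectLeftGo a x n lo hi → a[j] < x) ∧
    (∀ j (h : j < a.length), pvBisectLeftGo a x n lo hi ≤ j → x ≤ a[j]) := by
  intro n
  induction n with
  | zero =>
    intro lo hi hn hlh hhl h1 h2
    rw [pvBisectLeftGo]
    exact ⟨by omega, fun j h hj => h1 j h hj, fun j h hj => h2 j h (by omega)⟩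
  | succ n ih =>
    intro lo hi hn hlh hhl h1 h2
    by_cases h : lo < hi
    · rw [pvBisectLeftGo, if_pos h]
      have hmid1 : lo ≤ (lo + hi) / 2 := by omega
      have hmid2 : (lo + hi) / 2 < hi := by omega
      have hmidl : (lo + hi) / 2 < a.length := by omega
      have hgd : a.getD ((lo + hi) / 2) 0 = a[(lo + hi) / 2] := List.getD_eq_getElem a 0 hmidl
      by_cases hc : a.getD ((lo + hi) / 2) 0 < x
      · rw [if_pos hc]
        apply ih ((lo + hi) / 2 + 1) hi (by omega) (by omega) hhl
        · intro j hj hjm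
          rcases Nat.lt_or_ge j ((lo + hi) / 2) with hlt | hge
          · calc a[j] ≤ a[(lo + hi) / 2] := List.pairwise_iff_getElem.mp hs j _ hj hmidl hlt
              _ < x := hgd ▸ hc
          · have : j = (lo + hi) / 2 := by omega
            subst this; exact hgd ▸ hc
        · exact h2
      · rw [if_neg hc]
        apply ih lo ((lo + hi) / 2) (by omega) (by omega) (by omega) h1
        intro j hj hjm
        have hx : x ≤ a[(lo + hi) / 2] := by rw [← hgd]; omega
        rcases Nat.lt_or_ge ((lo + hi) / 2) j with hlt | hge
        · exact hx.trans (List.pairwise_iff_getElem.mp hs _ j hmidl hj hlt)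
        · have : j = (lo + hi) / 2 := by omega
          subst this; exact hx
    · rw [pvBisectLeftGo, if_neg h]
      exact ⟨by omega, fun j hj hjm => h1 j hj hjm, fun j hj hjm => h2 j hj (by omega)⟩

-- invariant of Source B's _bisect_right loop on a sorted list
lemma pvBisectRight_inv (a : List Int) (x : Int) (hs : a.Pairwise (· ≤ ·)) :
    ∀ n lo hi, hi - lo ≤ n → lo ≤ hi → hi ≤ a.length →
    (∀ j (h : j < a.length), j < lo → a[j] ≤ x) →
    (∀ j (h : j < a.length), hi ≤ j → x < a[j]) →
    pvBisectRightGo a x n lo hi ≤ a.length ∧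
    (∀ j (h : j < a.length), j < pvBisectRightGo a x n lo hi → a[j] ≤ x) ∧
    (∀ j (h : j < a.length), pvBisectRightGo a x n lo hi ≤ j → x < a[j]) := by
  intro n
  induction n with
  | zero =>
    intro lo hi hn hlh hhl h1 h2
    rw [pvBisectRightGo]
    exact ⟨by omega, fun j h hj => h1 j h hj, fun j h hj => h2 j h (by omega)⟩
  | succ n ih =>
    intro lo hi hn hlh hhl h1 h2
    by_cases h : lo < hi
    · rw [pvBisectRightGo, if_pos h]
      have hmid1 : lo ≤ (lo + hi) / 2 := by omega
      have hmid2 : (lo + hi) / 2 < hi := by omega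
      have hmidl : (lo + hi) / 2 < a.length := by omega
      have hgd : a.getD ((lo + hi) / 2) 0 = a[(lo + hi) / 2] := List.getD_eq_getElem a 0 hmidl
      by_cases hc : x < a.getD ((lo + hi) / 2) 0
      · rw [if_pos hc]
        apply ih lo ((lo + hi) / 2) (by omega) (by omega) (by omega) h1
        intro j hj hjm
        have hx : x < a[(lo + hi) / 2] := hgd ▸ hc
        rcases Nat.lt_or_ge ((lo + hi) / 2) j with hlt | hge
        · exact hx.trans_le (List.pairwise_iff_getElem.mp hs _ j hmidl hj hlt)
        · have : j = (lo + hi) / 2 := by omega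
          subst this; exact hx
      · rw [if_neg hc]
        apply ih ((lo + hi) / 2 + 1) hi (by omega) (by omega) hhl
        · intro j hj hjm
          have hx : a[(lo + hi) / 2] ≤ x := by rw [← hgd]; omega
          rcases Nat.lt_or_ge j ((lo + hi) / 2) with hlt | hge
          · exact (List.pairwise_iff_getElem.mp hs j _ hj hmidl hlt).trans hx
          · have : j = (lo + hi) / 2 := by omega
            subst this; exact hx
        · exact h2
    · rw [pvBisectRightGo, if_neg h]
      exact ⟨by omega, fun j hj hjm => h1 j hj hjm, fun j hj hjm => h2 j hj (by omega)⟩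

lemma pvBisectLeft_count (a : List Int) (x : Int) (hs : a.Pairwise (· ≤ ·)) :
    pvBisectLeft a x 0 a.length = a.countP (fun v => decide (v < x)) := by
  obtain ⟨h0, h1, h2⟩ := pvBisectLeft_inv a x hs (a.length - 0) 0 a.length (by omega) (by omega)
    (le_refl _) (by omega) (by omega)
  rw [pvBisectLeft]
  exact (pvCount_of_split a _ _ h0
    (fun j hj hjr => by simp [h1 j hj hjr])
    (fun j hj hjr => by simp [not_lt]; exact h2 j hj hjr)).symm

lemma pvBisectRight_count (a : List Int) (x : Int) (hs : a.Pairwise (· ≤ ·)) :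
    pvBisectRight a x 0 a.length = a.countP (fun v => decide (v ≤ x)) := by
  obtain ⟨h0, h1, h2⟩ := pvBisectRight_inv a x hs (a.length - 0) 0 a.length (by omega) (by omega)
    (le_refl _) (by omega) (by omega)
  rw [pvBisectRight]
  exact (pvCount_of_split a _ _ h0
    (fun j hj hjr => by simp [h1 j hj hjr])
    (fun j hj hjr => by simp [not_le]; exact h2 j hj hjr)).symm

-- slicing a fst-sorted pair list between the two bisection counts IS filtering by the interval
lemma pvDropTakeCount (l : List (Int × Int)) (lo hi : Int)
    (hs : l.Pairwise (fun a b => a.1 ≤ b.1)) :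
    (l.drop (l.countP (fun p => decide (p.1 < lo)))).take
      (l.countP (fun p => decide (p.1 ≤ hi)) - l.countP (fun p => decide (p.1 < lo)))
    = l.filter (fun p => decide (lo ≤ p.1 ∧ p.1 ≤ hi)) := by
  induction l with
  | nil => simp
  | cons h t ih =>
    rw [List.pairwise_cons] at hs
    obtain ⟨hh, ht⟩ := hs
    have IH := ih ht
    by_cases hlo : h.1 < lo
    · by_cases hhi : h.1 ≤ hi
      · simp only [List.countP_cons, List.filter_cons]
        simp [hlo, hhi, not_le.mpr hlo, IH, Nat.add_sub_add_right]
      · have hz : t.countP (fun p => decide (p.1 ≤ hi)) = 0 :=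
          List.countP_eq_zero.mpr (fun p hp => by simp; linarith [hh p hp])
        have hf : (h :: t).filter (fun p => decide (lo ≤ p.1 ∧ p.1 ≤ hi)) = [] :=
          List.filter_eq_nil_iff.mpr (by
            intro p hp
            rcases List.mem_cons.mp hp with rfl | hp'
            · simp; intro _; linarith
            · simp; intro _; linarith [hh p hp'])
        rw [hf]
        simp only [List.countP_cons]
        simp [hlo, hhi, hz]
    · have htlo : t.countP (fun p => decide (p.1 < lo)) = 0 :=
        List.countP_eq_zero.mpr (fun p hp => by simp; linarith [hh p hp])
      by_cases hhi : h.1 ≤ hi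
      · simp only [List.countP_cons, List.filter_cons]
        have IH' := IH
        rw [htlo] at IH' ⊢
        simp only [hlo, hhi, decide_true, if_pos]
        simp only [decide_eq_true_eq]
        simp [not_lt.mp hlo]
        simpa using IH'
      · have hz : t.countP (fun p => decide (p.1 ≤ hi)) = 0 :=
          List.countP_eq_zero.mpr (fun p hp => by simp; linarith [hh p hp])
        have hf : (h :: t).filter (fun p => decide (lo ≤ p.1 ∧ p.1 ≤ hi)) = [] :=
          List.filter_eq_nil_iff.mpr (by
            intro p hp
            rcases List.mem_cons.mp hp with rfl | hp'
            · simp; intro _; linarith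
            · simp; intro _; linarith [hh p hp'])
        rw [hf]
        simp only [List.countP_cons]
        simp [hlo, hhi, hz, htlo]

-- B's bucket for bounds (lo, hi) equals A's filter of xeval
lemma pvBucket_eq_filter (xeval : List Int) (lo hi : Int) :
    (PySem.List.sorted
      (PySem.List.slice ((PySem.List.sorted ((PySem.List.enumerate xeval).map (fun p => (p.2, p.1))) (fun p => p.1) false).map (fun p => p.2))
          (some ((pvBisectLeft ((PySem.List.sorted ((PySem.List.enumerate xeval).map (fun p => (p.2, p.1))) (fun p => p.1) false).map (fun p => p.1)) lo 0 ((PySem.List.sorted ((PySem.List.enumerate xeval).map (fun p => (p.2, p.1))) (fun p => p.1) false).map (fun p => p.1)).length : Nat) : Int))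
          (some ((pvBisectRight ((PySem.List.sorted ((PySem.List.enumerate xeval).map (fun p => (p.2, p.1))) (fun p => p.1) false).map (fun p => p.1)) hi 0 ((PySem.List.sorted ((PySem.List.enumerate xeval).map (fun p => (p.2, p.1))) (fun p => p.1) false).map (fun p => p.1)).length : Nat) : Int)))
      (fun i => i) false).map (fun i => PySem.List.pyGetD xeval i 0)
    = xeval.filter (fun point => decide (lo ≤ point ∧ point ≤ hi)) := by
  set E : List (Int × Int) := (PySem.List.enumerate xeval).map (fun p => (p.2, p.1)) with hE
  set pairs : List (Int × Int) := PySem.List.sorted E (fun p => p.1) false with hpairs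
  set vals : List Int := pairs.map (fun p => p.1) with hvals
  have hp : pairs.Pairwise (fun a b => a.1 ≤ b.1) := PySem.List.sorted_pairwise E (fun p => p.1)
  have hv : vals.Pairwise (· ≤ ·) := hp.map _ (fun _ _ h => h)
  have hL : pvBisectLeft vals lo 0 vals.length = pairs.countP (fun p => decide (p.1 < lo)) := by
    rw [pvBisectLeft_count vals lo hv, hvals, List.countP_map]; rfl
  have hR : pvBisectRight vals hi 0 vals.length = pairs.countP (fun p => decide (p.1 ≤ hi)) := by
    rw [pvBisectRight_count vals hi hv, hvals, List.countP_map]; rfl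
  set pos : List Int := pairs.map (fun p => p.2) with hposdef
  have hslice : PySem.List.slice pos
      (some ((pvBisectLeft vals lo 0 vals.length : Nat) : Int))
      (some ((pvBisectRight vals hi 0 vals.length : Nat) : Int))
      = (pairs.filter (fun p => decide (lo ≤ p.1 ∧ p.1 ≤ hi))).map (fun p => p.2) := by
    rw [PySem.List.slice_natCast, hL, hR, ← pvDropTakeCount pairs lo hi hp, hposdef]
    simp [List.map_take, List.map_drop]
  rw [hslice]
  have hfilterE : E.filter (fun p => decide (lo ≤ p.1 ∧ p.1 ≤ hi))
      = ((PySem.List.enumerate xeval).filter (fun p => decide (lo ≤ p.2 ∧ p.2 ≤ hi))).map (fun p => (p.2, p.1)) := by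
    rw [hE, List.filter_map]; rfl
  have hpos : PySem.List.sorted
      ((pairs.filter (fun p => decide (lo ≤ p.1 ∧ p.1 ≤ hi))).map (fun p => p.2)) (fun i => i) false
      = ((PySem.List.enumerate xeval).filter (fun p => decide (lo ≤ p.2 ∧ p.2 ≤ hi))).map (fun p => p.1) := by
    apply PySem.List.sorted_eq_of_perm_of_pairwise_lt
    · have h1 : (pairs.filter (fun p => decide (lo ≤ p.1 ∧ p.1 ≤ hi))).Perm
          (E.filter (fun p => decide (lo ≤ p.1 ∧ p.1 ≤ hi))) :=
        (PySem.List.sorted_perm E (fun p => p.1) false).filter _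
      have h2 := (h1.map (fun p : Int × Int => p.2)).symm
      rw [hfilterE] at h2
      simpa using h2
    · exact ((PySem.List.pairwise_lt_enumerate xeval 0).filter _).map _ (fun _ _ h => h)
  rw [hpos]
  rw [List.map_map]
  have hcong : ∀ p ∈ (PySem.List.enumerate xeval).filter (fun p => decide (lo ≤ p.2 ∧ p.2 ≤ hi)),
      ((fun i => PySem.List.pyGetD xeval i 0) ∘ (fun p : Int × Int => p.1)) p = p.2 := by
    intro p hpmem
    obtain ⟨k, hk, rfl⟩ := (PySem.List.mem_enumerate_iff xeval 0 p).mp (List.mem_of_mem_filter hpmem)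
    simp [PySem.List.pyGetD_natCast, List.getElem?_eq_getElem hk]
  rw [List.map_congr_left hcong]
  have := List.filter_map (f := fun p : Int × Int => p.2)
    (p := fun point => decide (lo ≤ point ∧ point ≤ hi)) (l := PySem.List.enumerate xeval 0)
  rw [PySem.List.map_snd_enumerate] at this
  simpa [Function.comp] using this.symm

-- ===== VERDICT (by name: the statement is the Claim_ definition above) =====
theorem pointsInIntervals_spec : Claim_equal_pointsInIntervals := by
  intro xeval xint _
  unfold Spec_pointsInIntervals pointsInIntervals pointsInIntervals_alt
  rw [PySem.List.foldl_append_singleton_eq_map, PySem.List.foldl_append_singleton_eq_map]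
  refine List.map_congr_left (fun k _ => ?_)
  rw [PySem.List.foldl_append_ite_eq_filter]
  exact (pvBucket_eq_filter xeval (PySem.List.pyGetD xint k 0) (PySem.List.pyGetD xint (k+1) 0)).symm
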